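-- pv_equiv track=rewrite | github.com/Stusigh/600.2xProblemSet1 | time tester.py | stu_transport
-- ===== SOURCE A (Python) =====
-- def stu_transport(cows,limit=10):
--
--     def find_heaviest(dict_cows, limit):
--         '''given a dictionary of cows and a limit, returns the heaviest cow that
--         fits in that limit'''
--         copydic = dict_cows.copy()
--         heaviest = (None, 0)
--         for cow in dict_cows:
--             if dict_cows[cow] > heaviest[1]:
--                 heaviest = cow, dict_cows[cow]
--         if heaviest[1] > limit:
--             copydic.pop(heaviest[0])
--             return find_heaviest(copydic, limit)
--         else:
--             return heaviest
--
--     all_trips = []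
--     dict_copy = cows.copy()
--
--
--     while len(dict_copy) != 0:
--         trip = []
--         limit_copy = limit
--
--         while find_heaviest(dict_copy, limit_copy)[0]!= None:
--             cow_to_consider = find_heaviest(dict_copy, limit_copy)
--             dict_copy.pop(cow_to_consider[0])
--             limit_copy -= cow_to_consider[1]
--             trip.append(cow_to_consider[0])
--
--         all_trips.append(trip)
--
--     return all_trips
-- ===== SOURCE B (Python) =====
-- def stu_transport(cows, limit=10):
--     # Sort the cows once by descending weight (stable), then build each trip
--     # with a single forward pass that takes every cow still fitting.
--     remaining = sorted(cows.items(), key=lambda kv: -kv[1])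
--     trips = []
--     while remaining:
--         cap = limit
--         trip = []
--         rest = []
--         for name, w in remaining:
--             if w <= cap:
--                 trip.append(name)
--                 cap -= w
--             else:
--                 rest.append((name, w))
--         trips.append(trip)
--         remaining = rest
--     return trips
-- ===== Notes on version B (the rewrite author's own statement) =====
-- stated objective: faster
-- what changed: A re-scans the whole dict with a recursive find_heaviest (itself repeatedly copying and shrinking the dict) for every single cow placed; B sorts the cows once by descending weight (stable) and fills each trip with one forward pass over the still-unplaced cows, so the repeated max-scans disappear.
import Mathlib
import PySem

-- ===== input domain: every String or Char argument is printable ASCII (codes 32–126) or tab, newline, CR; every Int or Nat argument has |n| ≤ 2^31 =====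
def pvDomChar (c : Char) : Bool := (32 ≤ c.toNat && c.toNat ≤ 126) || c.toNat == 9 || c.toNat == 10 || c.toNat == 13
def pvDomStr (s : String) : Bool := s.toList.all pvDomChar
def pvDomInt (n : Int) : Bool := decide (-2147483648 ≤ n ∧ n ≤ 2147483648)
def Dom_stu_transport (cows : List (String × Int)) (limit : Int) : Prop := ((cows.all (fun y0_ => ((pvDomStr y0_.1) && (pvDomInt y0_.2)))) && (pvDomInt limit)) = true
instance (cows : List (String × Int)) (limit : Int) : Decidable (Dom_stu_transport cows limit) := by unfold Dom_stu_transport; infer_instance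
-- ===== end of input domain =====

-- B changes the algorithm: one stable descending sort then a single forward pass per trip,
-- instead of A's recursive max-rescan of the dict for every cow placed (objective: faster).

-- ===== PORT A =====
-- termination helper for the ports: erasing a present key shrinks the dict
theorem pvSizeEraseLt (d : PySem.Dict String Int) (k : String) (hc : d.contains k = true) :
    (d.erase k).size < d.size := by
  simp only [PySem.Dict.size, PySem.Dict.erase, PySem.Dict.contains, List.any_eq_true] at *
  obtain ⟨p, hp, hpk⟩ := hc
  have hsub : (d.items.filter (fun p => !(p.1 == k))).Sublist d.items := List.filter_sublist
  rcases Nat.lt_or_ge (d.items.filter (fun p => !(p.1 == k))).length d.items.length with h | h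
  · exact h
  · exfalso
    have heq : d.items.filter (fun p => !(p.1 == k)) = d.items :=
      hsub.eq_of_length (Nat.le_antisymm hsub.length_le h)
    have := List.filter_eq_self.mp heq p hp
    simp [hpk] at this

-- the 'for cow in dict_cows' running-maximum scan inside find_heaviest
def pvMaxScan (items : List (String × Int)) : Option String × Int :=
  items.foldl (fun h p => if p.2 > h.2 then (some p.1, p.2) else h) (none, 0)

-- find_heaviest: scan for the heaviest cow; if it exceeds the limit, drop it from a copy and retry
def pvFindHeaviest (d : PySem.Dict String Int) (lim : Int) : Option String × Int :=
  let heaviest := pvMaxScan d.items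
  if heaviest.2 > lim then
    match heaviest.1 with
    | some k =>
      if hc : d.contains k then pvFindHeaviest (d.erase k) lim
      else (none, 0)   -- Python's copydic.pop would raise KeyError; unreachable (the max key is in the dict)
    | none => (none, 0) -- Python's copydic.pop(None) raises KeyError; not reached on inputs satisfying Pre_
  else heaviest
termination_by d.size
decreasing_by exact pvSizeEraseLt d k hc

-- the inner 'while find_heaviest(...)[0] != None' loop (find_heaviest is pure, so the
-- two Python calls per iteration compute the same pair; it is computed once here)
def pvTripLoop (d : PySem.Dict String Int) (cap : Int) : List String × PySem.Dict String Int :=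
  let f := pvFindHeaviest d cap
  match f.1 with
  | some k =>
    if hc : d.contains k then
      let r := pvTripLoop (d.erase k) (cap - f.2)
      (k :: r.1, r.2)
    else ([], d)       -- Python's dict_copy.pop would raise KeyError; unreachable
  | none => ([], d)
termination_by d.size
decreasing_by exact pvSizeEraseLt d k hc

-- the outer 'while len(dict_copy) != 0' loop
def pvOuterLoop (d : PySem.Dict String Int) (limit : Int) : List (List String) :=
  if d.size ≠ 0 then
    let r := pvTripLoop d limit
    if h : r.2.size < d.size then r.1 :: pvOuterLoop r.2 limit
    else [r.1]         -- totality guard: Python loops forever when no cow can ever be loaded; not reached under Pre_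
  else []
termination_by d.size

def stu_transport (cows : List (String × Int)) (limit : Int) : List (List String) :=
  pvOuterLoop (PySem.Dict.ofList cows) limit

-- ===== PORT B =====
-- the 'for name, w in remaining' pass: returns (trip, rest)
def pvAltPass (cap : Int) (l : List (String × Int)) : List String × List (String × Int) :=
  match l with
  | [] => ([], [])
  | p :: rest =>
    if p.2 ≤ cap then
      let r := pvAltPass (cap - p.2) rest
      (p.1 :: r.1, r.2)
    else
      let r := pvAltPass cap rest
      (r.1, p :: r.2)

-- the 'while remaining' loop
def pvAltLoop (remaining : List (String × Int)) (limit : Int) : List (List String) :=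
  match remaining with
  | [] => []
  | p :: t =>
    let r := pvAltPass limit (p :: t)
    if h : r.2.length < (p :: t).length then r.1 :: pvAltLoop r.2 limit
    else [r.1]         -- totality guard: Python loops forever when nothing fits; not reached under Pre_
termination_by remaining.length
decreasing_by exact h

def stu_transport_alt (cows : List (String × Int)) (limit : Int) : List (List String) :=
  pvAltLoop (PySem.List.sorted (PySem.Dict.ofList cows).items (fun kv => -kv.2)) limit

-- ===== PRECONDITION & SPEC =====
-- Pre_: every cow of the dict weighs more than 0 and at most the limit — exactly the inputs
-- on which A's while-loops terminate (otherwise A loops forever and returns nothing).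
-- Stated on PySem.Dict.ofList cows, i.e. on the dict the association list denotes.
def Pre_stu_transport (cows : List (String × Int)) (limit : Int) : Prop :=
  ∀ p ∈ (PySem.Dict.ofList cows).items, 0 < p.2 ∧ p.2 ≤ limit
instance (cows : List (String × Int)) (limit : Int) : Decidable (Pre_stu_transport cows limit) := by
  unfold Pre_stu_transport; infer_instance

def pvWitness_stu_transport : (List (String × Int)) × Int := ([("bessie", 3), ("elsie", 5), ("dot", 5)], 10)

def Spec_stu_transport (cows : List (String × Int)) (limit : Int) (out : List (List String)) : Prop :=
  out = stu_transport_alt cows limit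
instance (cows : List (String × Int)) (limit : Int) (out : List (List String)) : Decidable (Spec_stu_transport cows limit out) := by
  unfold Spec_stu_transport; infer_instance

-- ===== CLAIM (what is proved, stated in full; the proofs are below) =====
def Claim_equal_stu_transport : Prop := ∀ (cows : List (String × Int)) (limit : Int), Dom_stu_transport cows limit → Pre_stu_transport cows limit → Spec_stu_transport cows limit (stu_transport cows limit)

-- ===== LEMMAS AND PROOFS =====

-- "x occurs before y" is '[x, y] <+ l'; pvSRO a b: equal-weight pairs ordered in a are so ordered in b
def pvSRO (a b : List (String × Int)) : Prop :=
  ∀ x y : String × Int, x.2 = y.2 → [x, y].Sublist a → [x, y].Sublist b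

def pvDesc (l : List (String × Int)) : Prop := l.Pairwise (fun a b => b.2 ≤ a.2)

-- ---- facts about the running-maximum scan ----

theorem pvScan_const (l : List (String × Int)) (h : Option String × Int)
    (hle : ∀ x ∈ l, x.2 ≤ h.2) :
    l.foldl (fun h p => if p.2 > h.2 then (some p.1, p.2) else h) h = h := by
  induction l generalizing h with
  | nil => rfl
  | cons a l ih =>
    have ha : ¬ a.2 > h.2 := by have := hle a (by simp); omega
    simpa [ha] using ih h (fun x hx => hle x (by simp [hx]))

theorem pvScan_lt (l : List (String × Int)) (h : Option String × Int) (c : Int)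
    (hh : h.2 < c) (hl : ∀ x ∈ l, x.2 < c) :
    (l.foldl (fun h p => if p.2 > h.2 then (some p.1, p.2) else h) h).2 < c := by
  induction l generalizing h with
  | nil => exact hh
  | cons a l ih =>
    by_cases hgt : a.2 > h.2
    · simp only [List.foldl_cons, if_pos hgt]
      exact ih (some a.1, a.2) (hl a (by simp)) (fun x hx => hl x (by simp [hx]))
    · simp only [List.foldl_cons, if_neg hgt]
      exact ih h hh (fun x hx => hl x (by simp [hx]))

theorem pvScan_cases (l : List (String × Int)) (h : Option String × Int) :
    l.foldl (fun h p => if p.2 > h.2 then (some p.1, p.2) else h) h = h ∨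
    ∃ q ∈ l, l.foldl (fun h p => if p.2 > h.2 then (some p.1, p.2) else h) h = (some q.1, q.2) ∧ h.2 < q.2 := by
  induction l generalizing h with
  | nil => exact Or.inl rfl
  | cons a l ih =>
    by_cases hgt : a.2 > h.2
    · simp only [List.foldl_cons, if_pos hgt]
      rcases ih (some a.1, a.2) with h1 | ⟨q, hq, h1, h2⟩
      · exact Or.inr ⟨a, by simp, h1, hgt⟩
      · exact Or.inr ⟨q, by simp [hq], h1, by simp at h2; omega⟩
    · simp only [List.foldl_cons, if_neg hgt]
      rcases ih h with h1 | ⟨q, hq, h1, h2⟩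
      · exact Or.inl h1
      · exact Or.inr ⟨q, by simp [hq], h1, h2⟩

theorem pvScan_init_le (l : List (String × Int)) (h : Option String × Int) :
    h.2 ≤ (l.foldl (fun h p => if p.2 > h.2 then (some p.1, p.2) else h) h).2 := by
  induction l generalizing h with
  | nil => exact le_rfl
  | cons a l ih =>
    by_cases hgt : a.2 > h.2
    · simp only [List.foldl_cons, if_pos hgt]
      exact le_trans (le_of_lt hgt) (ih (some a.1, a.2))
    · simpa [hgt] using ih h

theorem pvScan_mem_le (l : List (String × Int)) (h : Option String × Int) (x : String × Int) (hx : x ∈ l) :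
    x.2 ≤ (l.foldl (fun h p => if p.2 > h.2 then (some p.1, p.2) else h) h).2 := by
  induction l generalizing h with
  | nil => simp at hx
  | cons a l ih =>
    rcases List.mem_cons.mp hx with rfl | hx
    · by_cases hgt : x.2 > h.2
      · simp only [List.foldl_cons, if_pos hgt]
        exact pvScan_init_le l (some x.1, x.2)
      · simp only [List.foldl_cons, if_neg hgt]
        exact le_trans (not_lt.mp hgt) (pvScan_init_le l h)
    · by_cases hgt : a.2 > h.2 <;> simp only [List.foldl_cons, hgt, ite_true, ite_false]
      · exact ih (some a.1, a.2) hx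
      · exact ih h hx

theorem pvMaxScan_split (a b : List (String × Int)) (p : String × Int)
    (ha : ∀ x ∈ a, x.2 < p.2) (hb : ∀ x ∈ b, x.2 ≤ p.2) (hp : 0 < p.2) :
    pvMaxScan (a ++ p :: b) = (some p.1, p.2) := by
  unfold pvMaxScan
  rw [show a ++ p :: b = (a ++ [p]) ++ b by simp, List.foldl_append, List.foldl_append]
  have hlt : (a.foldl (fun h p => if p.2 > h.2 then (some p.1, p.2) else h) (none, 0)).2 < p.2 :=
    pvScan_lt a (none, 0) p.2 hp ha
  have hstep : ([p].foldl (fun h p => if p.2 > h.2 then (some p.1, p.2) else h)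
      (a.foldl (fun h p => if p.2 > h.2 then (some p.1, p.2) else h) (none, 0))) = (some p.1, p.2) := by
    simp [List.foldl_cons, hlt]
  rw [hstep]
  exact pvScan_const b (some p.1, p.2) (by simpa using hb)

theorem pvMaxScan_none (l : List (String × Int)) (h1 : (pvMaxScan l).1 = none) :
    pvMaxScan l = (none, 0) := by
  rcases pvScan_cases l (none, 0) with h | ⟨q, hq, he, _⟩
  · exact h
  · rw [pvMaxScan] at h1; rw [he] at h1; simp at h1

theorem pvMaxScan_some (l : List (String × Int)) (k : String) (h1 : (pvMaxScan l).1 = some k) :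
    (k, (pvMaxScan l).2) ∈ l ∧ 0 < (pvMaxScan l).2 := by
  rcases pvScan_cases l (none, 0) with h | ⟨q, hq, he, hlt⟩
  · rw [pvMaxScan] at h1; rw [h] at h1; simp at h1
  · rw [pvMaxScan] at h1 ⊢; rw [he] at h1 ⊢
    simp at h1 hlt ⊢
    subst h1
    exact ⟨hq, hlt⟩

-- ---- association-list facts ----

theorem pvUniqVal (l : List (String × Int)) (k : String) (v v' : Int)
    (hl : (l.map Prod.fst).Nodup) (h1 : (k, v) ∈ l) (h2 : (k, v') ∈ l) : v = v' := by
  induction l with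
  | nil => simp at h1
  | cons a l ih =>
    simp only [List.map_cons, List.nodup_cons] at hl
    rcases List.mem_cons.mp h1 with rfl | h1'
    · rcases List.mem_cons.mp h2 with h2' | h2'
      · have := h2'; simp at this; omega
      · exact absurd (List.mem_map_of_mem (f := Prod.fst) h2') hl.1
    · rcases List.mem_cons.mp h2 with rfl | h2'
      · exact absurd (List.mem_map_of_mem (f := Prod.fst) h1') hl.1
      · exact ih hl.2 h1' h2'

theorem pvFilterKeyErase (l : List (String × Int)) (p : String × Int)
    (hl : (l.map Prod.fst).Nodup) (hp : p ∈ l) :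
    l.filter (fun q => !(q.1 == p.1)) = l.erase p := by
  induction l with
  | nil => rfl
  | cons a l ih =>
    simp only [List.map_cons, List.nodup_cons] at hl
    rcases List.mem_cons.mp hp with rfl | hp'
    · rw [List.erase_cons_head]
      have hall : ∀ q ∈ l, (!(q.1 == p.1)) = true := by
        intro q hq
        have hne : q.1 ≠ p.1 := by
          intro e; exact hl.1 (e ▸ List.mem_map_of_mem (f := Prod.fst) hq)
        simp [hne]
      simp [List.filter_cons, List.filter_eq_self.mpr hall]
    · have hane : a.1 ≠ p.1 := by
        intro e; exact hl.1 (e ▸ List.mem_map_of_mem (f := Prod.fst) hp')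
      have hap : (a == p) = false := by
        apply beq_eq_false_iff_ne.mpr
        intro e; exact hane (congrArg Prod.fst e)
      rw [List.erase_cons, List.filter_cons]
      simp only [hap, if_false, hane, bne_iff_ne, ne_eq, not_false_eq_true, if_true]
      simp [hane, ih hl.2 hp']

-- ---- relative-order (pair-sublist) facts ----

theorem pvPairTotal (m : List (String × Int)) (x y : String × Int)
    (hx : x ∈ m) (hy : y ∈ m) (hxy : x ≠ y) :
    [x, y].Sublist m ∨ [y, x].Sublist m := by
  induction m with
  | nil => simp at hx
  | cons c m ih =>
    rcases List.mem_cons.mp hx with rfl | hx'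
    · left
      apply List.cons_sublist_cons.mpr
      apply List.singleton_sublist.mpr
      rcases List.mem_cons.mp hy with rfl | hy'
      · exact absurd rfl hxy
      · exact hy'
    · rcases List.mem_cons.mp hy with rfl | hy'
      · right
        exact List.cons_sublist_cons.mpr (List.singleton_sublist.mpr hx')
      · rcases ih hx' hy' with h | h
        · exact Or.inl (h.cons c)
        · exact Or.inr (h.cons c)

theorem pvPairNe (m : List (String × Int)) (x y : String × Int)
    (hm : m.Nodup) (h : [x, y].Sublist m) : x ≠ y := by
  intro e
  subst e
  have hc := h.count_le x
  have h1 := List.nodup_iff_count_le_one.mp hm x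
  simp at hc
  omega

theorem pvPairAntisym (m : List (String × Int)) (x y : String × Int)
    (hm : m.Nodup) (h1 : [x, y].Sublist m) (h2 : [y, x].Sublist m) : False := by
  induction m with
  | nil => exact absurd h1 (by simp)
  | cons c m ih =>
    have hne : x ≠ y := pvPairNe _ x y hm h1
    rcases List.sublist_cons_iff.mp h1 with h1' | ⟨r, hr, hr'⟩
    · rcases List.sublist_cons_iff.mp h2 with h2' | ⟨r, hr2, hr2'⟩
      · exact ih (List.nodup_cons.mp hm).2 h1' h2'
      · have hyc : y = c := by injection hr2
        have hym : y ∈ m := h1'.subset (by simp)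
        exact (List.nodup_cons.mp hm).1 (hyc ▸ hym)
    · have hxc : x = c := by injection hr
      have hxm : x ∈ m := by
        rcases List.sublist_cons_iff.mp h2 with h2' | ⟨r2, hr2, hr2'⟩
        · exact h2'.subset (by simp)
        · have : y = c := by injection hr2
          exact absurd (this.trans hxc.symm) (Ne.symm hne)
      exact (List.nodup_cons.mp hm).1 (hxc ▸ hxm)

theorem pvPairRestrict (m m' : List (String × Int)) (x y : String × Int)
    (hm : m.Nodup) (hsub : m'.Sublist m) (hx : x ∈ m') (hy : y ∈ m')
    (h : [x, y].Sublist m) : [x, y].Sublist m' := by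
  revert hm hx hy h
  induction hsub with
  | slnil => intro _ _ _ h; exact h
  | @cons l₁ l₂ a hsub ih =>
    intro hm hx hy h
    have hxm : x ∈ l₂ := hsub.subset hx
    have hxa : x ≠ a := by
      intro e; exact (List.nodup_cons.mp hm).1 (e ▸ hxm)
    rcases List.sublist_cons_iff.mp h with h' | ⟨r, hr, _⟩
    · exact ih (List.nodup_cons.mp hm).2 hx hy h'
    · have : x = a := by injection hr
      exact absurd this hxa
  | @cons₂ l₁ l₂ a hsub ih =>
    intro hm hx hy h
    have hne : x ≠ y := pvPairNe _ x y hm h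
    by_cases hxa : x = a
    · subst hxa
      have hy' : y ∈ l₁ := by
        rcases List.mem_cons.mp hy with rfl | hy'
        · exact absurd rfl hne
        · exact hy'
      exact List.cons_sublist_cons.mpr (List.singleton_sublist.mpr hy')
    · have h' : [x, y].Sublist l₂ := by
        rcases List.sublist_cons_iff.mp h with h' | ⟨r, hr, _⟩
        · exact h'
        · have : x = a := by injection hr
          exact absurd this hxa
      have hym : y ∈ l₂ := h'.subset (by simp)
      have hya : y ≠ a := by
        intro e; exact (List.nodup_cons.mp hm).1 (e ▸ hym)
      have hx' : x ∈ l₁ := by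
        rcases List.mem_cons.mp hx with rfl | hx'
        · exact absurd rfl hxa
        · exact hx'
      have hy'' : y ∈ l₁ := by
        rcases List.mem_cons.mp hy with rfl | hy'
        · exact absurd rfl hya
        · exact hy'
      exact (ih (List.nodup_cons.mp hm).2 hx' hy'' h').cons a

theorem pvSROFlip (a b : List (String × Int)) (hperm : a.Perm b)
    (hna : a.Nodup) (hnb : b.Nodup) (h : pvSRO a b) : pvSRO b a := by
  intro x y hw hxy
  have hx : x ∈ a := hperm.mem_iff.mpr (hxy.subset (by simp))
  have hy : y ∈ a := hperm.mem_iff.mpr (hxy.subset (by simp))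
  have hne : x ≠ y := pvPairNe b x y hnb hxy
  rcases pvPairTotal a x y hx hy hne with h1 | h1
  · exact h1
  · exact absurd hxy (fun h2 => pvPairAntisym b y x hnb (h y x hw.symm h1) h2)

theorem pvPairDropLeft (pre l : List (String × Int)) (x y : String × Int)
    (hx : x ∉ pre) (h : [x, y].Sublist (pre ++ l)) : [x, y].Sublist l := by
  induction pre with
  | nil => simpa using h
  | cons c pre ih =>
    have hxc : x ≠ c := fun e => hx (by simp [e])
    rcases List.sublist_cons_iff.mp h with h' | ⟨r, hr, _⟩
    · exact ih (fun e => hx (by simp [e])) h'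
    · have : x = c := by injection hr
      exact absurd this hxc

theorem pvPairHead (t : List (String × Int)) (p x : String × Int)
    (hnd : (p :: t).Nodup) (hne : x ≠ p) : ¬ [x, p].Sublist (p :: t) := by
  intro h
  rcases List.sublist_cons_iff.mp h with h' | ⟨r, hr, _⟩
  · exact (List.nodup_cons.mp hnd).1 (h'.subset (by simp))
  · have : x = p := by injection hr
    exact hne this

theorem pvPairMidMem (m1 m2 : List (String × Int)) (x y : String × Int)
    (h1 : x ∉ m1) (h2 : x ∉ m2) (h : [x, y].Sublist (m1 ++ x :: m2)) : y ∈ m2 := by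
  induction m1 with
  | nil =>
    rcases List.sublist_cons_iff.mp h with h' | ⟨r, hr, hr'⟩
    · exact absurd (h'.subset (by simp)) h2
    · have hre : [y] = r := by injection hr
      exact List.singleton_sublist.mp (hre ▸ hr')
  | cons c m1 ih =>
    have hxc : x ≠ c := fun e => h1 (by simp [e])
    rcases List.sublist_cons_iff.mp h with h' | ⟨r, hr, _⟩
    · exact ih (fun e => h1 (by simp [e])) h'
    · have : x = c := by injection hr
      exact absurd this hxc

-- ---- stability of the sort ----


theorem pvInsertByCons (before : (String × Int) → (String × Int) → Bool) (x y : String × Int)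
    (ys : List (String × Int)) :
    PySem.List.insertBy before x (y :: ys) =
      if before x y then x :: y :: ys else y :: PySem.List.insertBy before x ys := rfl

theorem pvTripLoop_none (d : PySem.Dict String Int) (cap : Int)
    (hf : (pvFindHeaviest d cap).1 = none) : pvTripLoop d cap = ([], d) := by
  rw [pvTripLoop]; simp [hf]

theorem pvTripLoop_stuck (d : PySem.Dict String Int) (cap : Int) (k : String)
    (hf : (pvFindHeaviest d cap).1 = some k) (hc : ¬ d.contains k = true) :
    pvTripLoop d cap = ([], d) := by
  rw [pvTripLoop]; simp [hf, hc]

theorem pvTripLoop_some (d : PySem.Dict String Int) (cap : Int) (k : String)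
    (hf : (pvFindHeaviest d cap).1 = some k) (hc : d.contains k = true) :
    pvTripLoop d cap =
      (k :: (pvTripLoop (d.erase k) (cap - (pvFindHeaviest d cap).2)).1,
        (pvTripLoop (d.erase k) (cap - (pvFindHeaviest d cap).2)).2) := by
  rw [pvTripLoop]; simp [hf, hc]

theorem pvOuterLoop_zero (d : PySem.Dict String Int) (limit : Int) (hd : d.size = 0) :
    pvOuterLoop d limit = [] := by
  rw [pvOuterLoop]; simp [hd]

theorem pvOuterLoop_go (d : PySem.Dict String Int) (limit : Int) (hd : d.size ≠ 0)
    (hlt : (pvTripLoop d limit).2.size < d.size) :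
    pvOuterLoop d limit = (pvTripLoop d limit).1 :: pvOuterLoop (pvTripLoop d limit).2 limit := by
  rw [pvOuterLoop]; simp [hd, hlt]

theorem pvAltLoop_nil (limit : Int) : pvAltLoop [] limit = [] := by
  rw [pvAltLoop]

theorem pvAltLoop_go (p : String × Int) (t : List (String × Int)) (limit : Int)
    (h : (pvAltPass limit (p :: t)).2.length < (p :: t).length) :
    pvAltLoop (p :: t) limit =
      (pvAltPass limit (p :: t)).1 :: pvAltLoop (pvAltPass limit (p :: t)).2 limit := by
  rw [pvAltLoop]; rw [dif_pos h]

theorem pvInsertBySplit (key : (String × Int) → Int) (x : String × Int) (m : List (String × Int))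
    (hm : m.Pairwise (fun a b => key a ≤ key b)) :
    ∃ m1 m2, PySem.List.insertBy (fun a b => decide (key a < key b)) x m = m1 ++ x :: m2 ∧
      m = m1 ++ m2 ∧ ∀ y ∈ m2, key x < key y := by
  induction m with
  | nil => exact ⟨[], [], rfl, rfl, by simp⟩
  | cons y ys ih =>
    rw [pvInsertByCons]
    by_cases hb : key x < key y
    · refine ⟨[], y :: ys, by simp [hb], rfl, ?_⟩
      intro z hz
      rcases List.mem_cons.mp hz with rfl | hz'
      · exact hb
      · have h1 : key y ≤ key z := (List.pairwise_cons.mp hm).1 z hz'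
        omega
    · obtain ⟨m1, m2, he, hm', hall⟩ := ih (List.pairwise_cons.mp hm).2
      exact ⟨y :: m1, m2, by simp [hb, he], by simp [hm'], hall⟩

theorem pvSortedStable (l : List (String × Int)) (hl : l.Nodup) :
    pvSRO (PySem.List.sorted l (fun p => -p.2)) l := by
  induction l using List.reverseRecOn with
  | nil =>
    intro x y _ hxy
    have : PySem.List.sorted ([] : List (String × Int)) (fun p => -p.2) = [] := rfl
    rw [this] at hxy
    simp at hxy
  | append_singleton l z ih =>
    have hl' : l.Nodup := (List.nodup_append.mp hl).1
    have hz : z ∉ l := fun hmem => (List.nodup_append.mp hl).2.2 z hmem z (by simp) rfl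
    have hzs : z ∉ PySem.List.sorted l (fun p => -p.2) :=
      fun hmem => hz ((PySem.List.sorted_perm l (fun p => -p.2) false).subset hmem)
    have hsnd : (PySem.List.sorted l (fun p => -p.2)).Nodup :=
      ((PySem.List.sorted_perm l (fun p => -p.2) false).nodup_iff).mpr hl'
    have hkey : PySem.List.sorted (l ++ [z]) (fun p : String × Int => -p.2) =
        PySem.List.insertBy (fun a b : String × Int => decide (-a.2 < -b.2)) z
          (PySem.List.sorted l (fun p => -p.2)) := by
      simp [PySem.List.sorted, List.foldl_append]
    obtain ⟨m1, m2, he, hm', hall⟩ :=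
      pvInsertBySplit (fun p => -p.2) z (PySem.List.sorted l (fun p => -p.2))
        (PySem.List.sorted_pairwise l (fun p => -p.2))
    have hzm1 : z ∉ m1 := fun h => hzs (by rw [hm']; exact List.mem_append.mpr (Or.inl h))
    have hzm2 : z ∉ m2 := fun h => hzs (by rw [hm']; exact List.mem_append.mpr (Or.inr h))
    have hnodmid : (m1 ++ z :: m2).Nodup := by
      rw [List.nodup_middle, List.nodup_cons]
      exact ⟨by rw [← hm']; exact hzs, by rw [← hm']; exact hsnd⟩
    intro x y hw hxy
    rw [hkey, he] at hxy
    by_cases hyz : y = z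
    · subst hyz
      have hxz : x ≠ y := pvPairNe _ x y hnodmid hxy
      have hxm : x ∈ m1 ++ m2 := by
        have hx1 : x ∈ m1 ++ y :: m2 := hxy.subset (by simp)
        rcases List.mem_append.mp hx1 with h | h
        · exact List.mem_append.mpr (Or.inl h)
        · rcases List.mem_cons.mp h with h' | h'
          · exact absurd h' hxz
          · exact List.mem_append.mpr (Or.inr h')
      have hxl : x ∈ l := (PySem.List.sorted_perm l (fun p => -p.2) false).subset (hm' ▸ hxm)
      have : [x].Sublist l := List.singleton_sublist.mpr hxl
      simpa using this.append (List.Sublist.refl [y])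
    · by_cases hxz : x = z
      · subst hxz
        have hym2 : y ∈ m2 := pvPairMidMem m1 m2 x y hzm1 hzm2 hxy
        have := hall y hym2
        simp at this
        omega
      · have hxy' : [x, y].Sublist (m1 ++ m2) := by
          have h1 := List.Sublist.erase z hxy
          rw [List.erase_of_not_mem (by simp; exact ⟨Ne.symm hxz, Ne.symm hyz⟩), List.erase_append_right _ hzm1,
            List.erase_cons_head] at h1
          exact h1
        have hxyl : [x, y].Sublist l := ih hl' x y hw (hm' ▸ hxy')
        exact hxyl.trans (List.sublist_append_left l [z])

-- ---- bridging the A-side loops ----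

theorem pvFindEqAux (n : Nat) : ∀ (d : PySem.Dict String Int) (lim : Int), d.size ≤ n → d.keys.Nodup →
    pvFindHeaviest d lim = pvMaxScan (d.items.filter (fun q => decide (q.2 ≤ lim))) := by
  induction n with
  | zero =>
    intro d lim hd _
    have hitems : d.items = [] := List.length_eq_zero_iff.mp (Nat.le_zero.mp hd)
    rw [pvFindHeaviest]
    simp [hitems, pvMaxScan]
  | succ n ih =>
    intro d lim hd hnd
    by_cases hgt : (pvMaxScan d.items).2 > lim
    · cases hma : (pvMaxScan d.items).1 with
      | none =>
        have hm0 : pvMaxScan d.items = (none, 0) := pvMaxScan_none _ hma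
        rw [pvFindHeaviest]
        simp only [hgt, if_true, hma]
        have hall : ∀ x ∈ d.items.filter (fun q => decide (q.2 ≤ lim)), x.2 ≤ ((none : Option String), (0:Int)).2 := by
          intro x hx
          have h1 := (List.mem_filter.mp hx).2
          have h0 : (0:Int) > lim := by rw [hm0] at hgt; exact hgt
          simp at h1 ⊢
          omega
        exact (pvScan_const _ (none, 0) hall).symm
      | some k =>
        obtain ⟨hmem, hpos⟩ := pvMaxScan_some _ k hma
        have hck : d.contains k = true := by
          simp only [PySem.Dict.contains]
          exact List.any_eq_true.mpr ⟨(k, (pvMaxScan d.items).2), hmem, by simp⟩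
        rw [pvFindHeaviest]
        simp only [hgt, if_true, hma, hck, dite_true]
        have hsz : (d.erase k).size ≤ n := by
          have := pvSizeEraseLt d k hck
          omega
        have hnd' : (d.erase k).keys.Nodup := by
          have hsub : (d.erase k).items.Sublist d.items := by
            simp only [PySem.Dict.erase]
            exact List.filter_sublist
          exact List.Nodup.sublist (hsub.map Prod.fst) hnd
        rw [ih (d.erase k) lim hsz hnd']
        congr 1
        simp only [PySem.Dict.erase]
        rw [List.filter_filter]
        apply List.filter_congr
        intro x hx
        by_cases hxk : x.1 = k
        · have hx2 : x.2 = (pvMaxScan d.items).2 := by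
            apply pvUniqVal d.items k x.2 (pvMaxScan d.items).2 hnd _ hmem
            rw [← hxk]; exact hx
          have : ¬ x.2 ≤ lim := by rw [hx2]; omega
          simp [this]
        · simp [hxk]
    · rw [pvFindHeaviest]
      simp only [hgt, if_false]
      have hall : ∀ x ∈ d.items, (fun q => decide (q.2 ≤ lim)) x = true := by
        intro x hx
        have h1 : x.2 ≤ (pvMaxScan d.items).2 := pvScan_mem_le d.items (none, 0) x hx
        simp
        omega
      rw [List.filter_eq_self.mpr hall]

theorem pvFindEq (d : PySem.Dict String Int) (lim : Int) (hnd : d.keys.Nodup) :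
    pvFindHeaviest d lim = pvMaxScan (d.items.filter (fun q => decide (q.2 ≤ lim))) :=
  pvFindEqAux d.size d lim le_rfl hnd

theorem pvTripSublist (n : Nat) : ∀ (d : PySem.Dict String Int) (cap : Int), d.size ≤ n →
    (pvTripLoop d cap).2.items.Sublist d.items := by
  induction n with
  | zero =>
    intro d cap hd
    have hitems : d.items = [] := List.length_eq_zero_iff.mp (Nat.le_zero.mp hd)
    cases hf : (pvFindHeaviest d cap).1 with
    | none => rw [pvTripLoop_none d cap hf]
    | some k =>
      have hc : ¬ d.contains k = true := by
        simp [PySem.Dict.contains, hitems]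
      rw [pvTripLoop_stuck d cap k hf hc]
  | succ n ih =>
    intro d cap hd
    cases hf : (pvFindHeaviest d cap).1 with
    | none => rw [pvTripLoop_none d cap hf]
    | some k =>
      by_cases hc : d.contains k = true
      · rw [pvTripLoop_some d cap k hf hc]
        have hsz : (d.erase k).size ≤ n := by
          have := pvSizeEraseLt d k hc
          omega
        have hsub : (d.erase k).items.Sublist d.items := by
          simp only [PySem.Dict.erase]
          exact List.filter_sublist
        exact (ih (d.erase k) (cap - (pvFindHeaviest d cap).2) hsz).trans hsub
      · rw [pvTripLoop_stuck d cap k hf hc]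

theorem pvAltPassLen (cap : Int) (l : List (String × Int)) :
    (pvAltPass cap l).2.length ≤ l.length := by
  induction l generalizing cap with
  | nil => simp [pvAltPass]
  | cons p t ih =>
    by_cases h : p.2 ≤ cap
    · simp only [pvAltPass, if_pos h]
      exact le_trans (ih (cap - p.2)) (Nat.le_succ _)
    · simp only [pvAltPass, if_neg h, List.length_cons]
      exact Nat.succ_le_succ (ih cap)

-- ---- the per-trip equivalence ----

theorem pvTripMain (n : Nat) : ∀ (s : List (String × Int)) (d : PySem.Dict String Int)
    (skip : List (String × Int)) (cap : Int),
    s.length ≤ n →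
    d.keys.Nodup →
    (∀ x ∈ d.items, 0 < x.2) →
    d.items.Perm (skip ++ s) →
    pvSRO (skip ++ s) d.items →
    pvDesc (skip ++ s) →
    (∀ x ∈ skip, cap < x.2) →
    (pvAltPass cap s).1 = (pvTripLoop d cap).1 ∧
    (pvTripLoop d cap).2.items.Perm (skip ++ (pvAltPass cap s).2) ∧
    pvSRO (skip ++ (pvAltPass cap s).2) (pvTripLoop d cap).2.items ∧
    pvDesc (skip ++ (pvAltPass cap s).2) := by
  have nilCase : ∀ (d : PySem.Dict String Int) (skip : List (String × Int)) (cap : Int),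
      d.keys.Nodup → d.items.Perm skip → (∀ x ∈ skip, cap < x.2) →
      pvTripLoop d cap = ([], d) := by
    intro d skip cap hnd hperm hskip
    have hfil : d.items.filter (fun q => decide (q.2 ≤ cap)) = [] := by
      apply List.filter_eq_nil_iff.mpr
      intro a ha
      have h1 := hskip a (hperm.mem_iff.mp ha)
      simp
      omega
    have hf1 : (pvFindHeaviest d cap).1 = none := by
      rw [pvFindEq d cap hnd, hfil]; rfl
    exact pvTripLoop_none d cap hf1
  induction n with
  | zero =>
    intro s d skip cap hlen hnd hpos hperm hsro hdesc hskip
    have hs : s = [] := List.length_eq_zero_iff.mp (Nat.le_zero.mp hlen)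
    subst hs
    rw [nilCase d skip cap hnd (by simpa using hperm) hskip]
    exact ⟨rfl, by simpa [pvAltPass] using hperm, by simpa [pvAltPass] using hsro,
      by simpa [pvAltPass] using hdesc⟩
  | succ n ih =>
    intro s d skip cap hlen hnd hpos hperm hsro hdesc hskip
    cases s with
    | nil =>
      rw [nilCase d skip cap hnd (by simpa using hperm) hskip]
      exact ⟨rfl, by simpa [pvAltPass] using hperm, by simpa [pvAltPass] using hsro,
        by simpa [pvAltPass] using hdesc⟩
    | cons p t =>
      have hlent : t.length ≤ n := by simp at hlen; omega
      have hitemsnd : d.items.Nodup := List.Nodup.of_map _ hnd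
      have hlistnd : (skip ++ p :: t).Nodup := hperm.nodup_iff.mp hitemsnd
      have hptsub : (p :: t).Sublist (skip ++ p :: t) := List.sublist_append_right skip (p :: t)
      have hptnd : (p :: t).Nodup := List.Nodup.sublist hptsub hlistnd
      by_cases hfit : p.2 ≤ cap
      · -- the head of the sorted remainder fits: it is exactly A's pick
        have hpmem : p ∈ d.items := hperm.mem_iff.mpr (by simp)
        have hpm1 : p ∈ d.items.filter (fun q => decide (q.2 ≤ cap)) :=
          List.mem_filter.mpr ⟨hpmem, by simp [hfit]⟩
        obtain ⟨a, b, hab⟩ := List.append_of_mem hpm1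
        have hm1sub : (d.items.filter (fun q => decide (q.2 ≤ cap))).Sublist d.items :=
          List.filter_sublist
        have hallle : ∀ x ∈ d.items.filter (fun q => decide (q.2 ≤ cap)), x.2 ≤ p.2 := by
          intro x hx
          have hxd : x ∈ d.items := hm1sub.subset hx
          have hxcap : x.2 ≤ cap := by have := (List.mem_filter.mp hx).2; simpa using this
          rcases List.mem_append.mp (hperm.mem_iff.mp hxd) with hxk | hxpt
          · exact absurd hxcap (not_le.mpr (hskip x hxk))
          · rcases List.mem_cons.mp hxpt with rfl | hxt
            · exact le_rfl
            · exact (List.pairwise_cons.mp (List.Pairwise.sublist hptsub hdesc)).1 x hxt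
        have hstrict : ∀ x ∈ a, x.2 < p.2 := by
          intro x hx
          have hxm1 : x ∈ d.items.filter (fun q => decide (q.2 ≤ cap)) := by
            rw [hab]; exact List.mem_append.mpr (Or.inl hx)
          rcases lt_or_eq_of_le (hallle x hxm1) with h | h
          · exact h
          · exfalso
            have hxp_m1 : [x, p].Sublist (d.items.filter (fun q => decide (q.2 ≤ cap))) := by
              rw [hab]
              have h1 : [x].Sublist a := List.singleton_sublist.mpr hx
              have h2 : [p].Sublist (p :: b) := by simp
              exact h1.append h2
            have hxp_d : [x, p].Sublist d.items := hxp_m1.trans hm1sub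
            have hxp_s : [x, p].Sublist (skip ++ p :: t) :=
              pvSROFlip _ _ hperm.symm hlistnd hitemsnd hsro x p h hxp_d
            have hxcap : x.2 ≤ cap := by
              have := (List.mem_filter.mp hxm1).2; simpa using this
            have hxnotskip : x ∉ skip := fun hxk => absurd (hskip x hxk) (not_lt.mpr hxcap)
            have hxp_pt : [x, p].Sublist (p :: t) := pvPairDropLeft skip _ x p hxnotskip hxp_s
            have hxnep : x ≠ p := pvPairNe d.items x p hitemsnd hxp_d
            exact pvPairHead t p x hptnd hxnep hxp_pt
        have hfind : pvFindHeaviest d cap = (some p.1, p.2) := by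
          rw [pvFindEq d cap hnd, hab]
          refine pvMaxScan_split a b p hstrict ?_ (hpos p hpmem)
          intro x hx
          exact hallle x (by rw [hab]; exact List.mem_append.mpr (Or.inr (List.mem_cons.mpr (Or.inr hx))))
        have hck : d.contains p.1 = true := by
          simp only [PySem.Dict.contains]
          exact List.any_eq_true.mpr ⟨p, hpmem, by simp⟩
        have htl : pvTripLoop d cap =
            (p.1 :: (pvTripLoop (d.erase p.1) (cap - p.2)).1,
              (pvTripLoop (d.erase p.1) (cap - p.2)).2) := by
          have h0 := pvTripLoop_some d cap p.1 (by rw [hfind]) hck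
          rw [hfind] at h0
          exact h0
        have hitems' : (d.erase p.1).items = d.items.erase p := by
          simp only [PySem.Dict.erase]
          exact pvFilterKeyErase d.items p hnd hpmem
        have hpnotskip : p ∉ skip :=
          fun hmem => (List.nodup_append.mp hlistnd).2.2 p hmem p (by simp) rfl
        have hperm' : (d.erase p.1).items.Perm (skip ++ t) := by
          rw [hitems']
          have h1 := List.Perm.erase p hperm
          rw [List.erase_append_right _ hpnotskip, List.erase_cons_head] at h1
          exact h1
        have hsub' : (d.erase p.1).items.Sublist d.items := by
          rw [hitems']; exact List.erase_sublist
        have hnd' : (d.erase p.1).keys.Nodup := List.Nodup.sublist (hsub'.map _) hnd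
        have hpos' : ∀ x ∈ (d.erase p.1).items, 0 < x.2 := fun x hx => hpos x (hsub'.subset hx)
        have hsublst : (skip ++ t).Sublist (skip ++ p :: t) :=
          List.Sublist.append_left (List.sublist_cons_self p t) skip
        have hsro' : pvSRO (skip ++ t) (d.erase p.1).items := by
          intro x y hw hxy
          have hxyd : [x, y].Sublist d.items := hsro x y hw (hxy.trans hsublst)
          refine pvPairRestrict d.items (d.erase p.1).items x y hitemsnd hsub' ?_ ?_ hxyd
          · exact hperm'.mem_iff.mpr (hxy.subset (by simp))
          · exact hperm'.mem_iff.mpr (hxy.subset (by simp))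
        have hdesc' : pvDesc (skip ++ t) := List.Pairwise.sublist hsublst hdesc
        have hskip' : ∀ x ∈ skip, cap - p.2 < x.2 := by
          intro x hx
          have h1 := hskip x hx
          have h2 := hpos p hpmem
          omega
        obtain ⟨c1, c2, c3, c4⟩ :=
          ih t (d.erase p.1) skip (cap - p.2) hlent hnd' hpos' hperm' hsro' hdesc' hskip'
        have hpass : pvAltPass cap (p :: t) =
            (p.1 :: (pvAltPass (cap - p.2) t).1, (pvAltPass (cap - p.2) t).2) := by
          simp [pvAltPass, hfit]
        refine ⟨?_, ?_, ?_, ?_⟩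
        · rw [hpass, htl]; simpa using c1
        · rw [hpass, htl]; simpa using c2
        · rw [hpass, htl]; simpa using c3
        · rw [hpass]; simpa using c4
      · -- the head does not fit: B skips it, A never picks it
        have hassoc : skip ++ p :: t = (skip ++ [p]) ++ t := by simp
        have hskip' : ∀ x ∈ skip ++ [p], cap < x.2 := by
          intro x hx
          rcases List.mem_append.mp hx with h | h
          · exact hskip x h
          · simp at h; subst h; omega
        obtain ⟨c1, c2, c3, c4⟩ :=
          ih t d (skip ++ [p]) cap hlent hnd hpos (hassoc ▸ hperm) (hassoc ▸ hsro)
            (hassoc ▸ hdesc) hskip'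
        have hpass : pvAltPass cap (p :: t) =
            ((pvAltPass cap t).1, p :: (pvAltPass cap t).2) := by
          simp [pvAltPass, hfit]
        refine ⟨?_, ?_, ?_, ?_⟩
        · rw [hpass]; simpa using c1
        · rw [hpass]; simpa [List.append_assoc] using c2
        · rw [hpass]
          show pvSRO (skip ++ (p :: (pvAltPass cap t).2)) _
          rw [show skip ++ (p :: (pvAltPass cap t).2) = (skip ++ [p]) ++ (pvAltPass cap t).2 by simp]
          exact c3
        · rw [hpass]
          show pvDesc (skip ++ (p :: (pvAltPass cap t).2))
          rw [show skip ++ (p :: (pvAltPass cap t).2) = (skip ++ [p]) ++ (pvAltPass cap t).2 by simp]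
          exact c4

-- ---- the outer loop ----

theorem pvOuterMain (n : Nat) : ∀ (d : PySem.Dict String Int) (s : List (String × Int)) (limit : Int),
    d.size ≤ n →
    d.keys.Nodup →
    (∀ x ∈ d.items, 0 < x.2 ∧ x.2 ≤ limit) →
    d.items.Perm s →
    pvSRO s d.items →
    pvDesc s →
    pvOuterLoop d limit = pvAltLoop s limit := by
  induction n with
  | zero =>
    intro d s limit hd hnd hb hperm hsro hdesc
    have hitems : d.items = [] := List.length_eq_zero_iff.mp (Nat.le_zero.mp hd)
    have hs : s = [] := by
      rw [hitems] at hperm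
      exact (hperm.symm.eq_nil)
    subst hs
    rw [pvOuterLoop_zero d limit (by simp [PySem.Dict.size, hitems]), pvAltLoop_nil]
  | succ n ih =>
    intro d s limit hd hnd hb hperm hsro hdesc
    by_cases hdz : d.size = 0
    · have hitems : d.items = [] := List.length_eq_zero_iff.mp (Nat.le_zero.mp (Nat.le_of_eq hdz))
      have hs : s = [] := by
        rw [hitems] at hperm
        exact (hperm.symm.eq_nil)
      subst hs
      rw [pvOuterLoop_zero d limit hdz, pvAltLoop_nil]
    · cases hs : s with
      | nil =>
        exfalso
        rw [hs] at hperm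
        exact hdz (by simp [PySem.Dict.size, hperm.eq_nil])
      | cons p t =>
        subst hs
        have hpd : p ∈ d.items := hperm.mem_iff.mpr (by simp)
        obtain ⟨hp0, hpl⟩ := hb p hpd
        obtain ⟨c1, c2, c3, c4⟩ :=
          pvTripMain (p :: t).length (p :: t) d [] limit le_rfl hnd
            (fun x hx => (hb x hx).1) (by simpa using hperm) (by simpa using hsro)
            (by simpa using hdesc) (by simp)
        have hpassfit : pvAltPass limit (p :: t) =
            (p.1 :: (pvAltPass (limit - p.2) t).1, (pvAltPass (limit - p.2) t).2) := by
          simp [pvAltPass, hpl]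
        have hrestlen : (pvAltPass limit (p :: t)).2.length < (p :: t).length := by
          rw [hpassfit]
          have := pvAltPassLen (limit - p.2) t
          simp
          omega
        have hlenperm : (pvTripLoop d limit).2.items.length = (pvAltPass limit (p :: t)).2.length := by
          have := c2.length_eq
          simpa using this
        have hdlen : d.items.length = (p :: t).length := hperm.length_eq
        have htriplt : (pvTripLoop d limit).2.size < d.size := by
          simp only [PySem.Dict.size]
          simp at hrestlen hdlen
          omega
        rw [pvOuterLoop_go d limit hdz htriplt, pvAltLoop_go p t limit hrestlen]
        have htsub : (pvTripLoop d limit).2.items.Sublist d.items :=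
          pvTripSublist d.size d limit le_rfl
        congr 1
        · exact c1.symm
        · apply ih (pvTripLoop d limit).2 (pvAltPass limit (p :: t)).2 limit
          · have : (pvTripLoop d limit).2.size < d.size := htriplt
            omega
          · exact List.Nodup.sublist (htsub.map _) hnd
          · exact fun x hx => hb x (htsub.subset hx)
          · simpa using c2
          · simpa using c3
          · simpa using c4

-- ===== VERDICT (by name: the statement is the Claim_ definition above) =====
theorem stu_transport_spec : Claim_equal_stu_transport := by
  intro cows limit _hdom hpre
  show stu_transport cows limit = stu_transport_alt cows limit
  unfold stu_transport stu_transport_alt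
  set d := PySem.Dict.ofList cows with hd
  have hnd : d.keys.Nodup := PySem.Dict.nodup_keys_ofList cows
  have hitems : d.items.Nodup := List.Nodup.of_map _ hnd
  apply pvOuterMain d.size d _ limit le_rfl hnd
  · exact hpre
  · exact (PySem.List.sorted_perm d.items (fun kv => -kv.2) false).symm
  · exact pvSortedStable d.items hitems
  · exact (PySem.List.sorted_pairwise d.items (fun kv => -kv.2)).imp (fun h => by omega)
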